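-- pv_equiv track=rewrite | github.com/fj4444/ubscc25_backend | Duolinggo.py | sort_numerals_1
-- ===== SOURCE A (Python) =====
-- def roman_to_int(s):
--     roman_map = {'I': 1, 'V': 5, 'X': 10, 'L': 50, 'C': 100, 'D': 500, 'M': 1000}
--     total = 0
--     n = len(s)
--     for i in range(n):
--         if i < n - 1 and roman_map[s[i]] < roman_map[s[i+1]]:
--             total -= roman_map[s[i]]
--         else:
--             total += roman_map[s[i]]
--     return total
--
-- def sort_numerals_1(nums):
--     converted = []
--     for num_str in nums:
--         # Check if it is a Roman numeral: all characters in "IVXLCDM"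
--         if all(c in "IVXLCDM" for c in num_str):
--             value = roman_to_int(num_str)
--         else:
--             value = int(num_str)
--         converted.append(value)
--
--     converted.sort()
--     return converted
-- ===== SOURCE B (Python) =====
-- def sort_numerals_1(nums):
--     result = []
--     for num_str in nums:
--         if all(c in "IVXLCDM" for c in num_str):
--             # right-to-left scan: each symbol is subtracted iff it is
--             # smaller than the symbol processed just before it (its right
--             # neighbour) -- same value as the left-to-right lookahead rule.
--             roman_map = {'I': 1, 'V': 5, 'X': 10, 'L': 50, 'C': 100, 'D': 500, 'M': 1000}
--             value = 0
--             prev = 0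
--             for c in reversed(num_str):
--                 cur = roman_map[c]
--                 value = value - cur if cur < prev else value + cur
--                 prev = cur
--         else:
--             value = int(num_str)
--         # keep `result` sorted at all times: insert before the first
--         # element that is >= value (no final sort pass)
--         i = 0
--         while i < len(result) and result[i] < value:
--             i += 1
--         result.insert(i, value)
--     return result
-- ===== Notes on version B (the rewrite author's own statement) =====
-- stated objective: alternative
-- what changed: Roman conversion is a right-to-left scan carrying the previously seen symbol value instead of A's indexed left-to-right lookahead loop, and the output is kept sorted at all times by insertion into position while converting (an online insertion sort), so the build-list-then-.sort() phase of A disappears.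
import Mathlib
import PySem

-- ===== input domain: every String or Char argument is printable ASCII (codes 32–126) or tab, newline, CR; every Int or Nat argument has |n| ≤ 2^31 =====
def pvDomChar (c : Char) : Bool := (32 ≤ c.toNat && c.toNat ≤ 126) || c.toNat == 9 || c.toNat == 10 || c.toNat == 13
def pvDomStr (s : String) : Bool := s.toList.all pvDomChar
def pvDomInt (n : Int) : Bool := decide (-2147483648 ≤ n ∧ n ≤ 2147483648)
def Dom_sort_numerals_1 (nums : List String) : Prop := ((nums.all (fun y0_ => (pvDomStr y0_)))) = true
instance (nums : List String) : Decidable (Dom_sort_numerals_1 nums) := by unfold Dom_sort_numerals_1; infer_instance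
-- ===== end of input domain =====

-- B converts Roman strings by a right-to-left scan carrying the previous symbol value and
-- keeps the output list sorted by insertion while converting, so A's indexed lookahead loop
-- and its final sort both disappear (objective: alternative).

-- roman_map[c]; inside the Roman branch every character is in "IVXLCDM", so the KeyError
-- case is unreachable and the default 0 is never used.
def pvRomanVal (c : Char) : Int :=
  if c = 'I' then 1 else if c = 'V' then 5 else if c = 'X' then 10
  else if c = 'L' then 50 else if c = 'C' then 100 else if c = 'D' then 500
  else if c = 'M' then 1000 else 0

-- all(c in "IVXLCDM" for c in num_str)
def pvIsRoman (s : String) : Bool :=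
  s.toList.all (fun c => ("IVXLCDM".toList).contains c)

-- ===== PORT A =====
-- roman_to_int: for i in range(n): lookahead comparison, add or subtract
def pvRomanA (cs : List Char) : Int :=
  (List.range cs.length).foldl
    (fun total i =>
      if i < cs.length - 1 ∧ pvRomanVal (cs.getD i ' ') < pvRomanVal (cs.getD (i+1) ' ')
      then total - pvRomanVal (cs.getD i ' ')
      else total + pvRomanVal (cs.getD i ' ')) 0

def sort_numerals_1 (nums : List String) : List Int :=
  let converted := nums.foldl
    (fun acc num_str =>
      acc ++ [if pvIsRoman num_str then pvRomanA num_str.toList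
              else (PySem.Int.ofStr? num_str).getD 0]) []
  PySem.List.sorted converted (fun x => x) false

-- ===== PORT B =====
-- for c in reversed(num_str): value ± cur depending on cur < prev; state = (value, prev)
def pvRomanB (cs : List Char) : Int :=
  (cs.reverse.foldl
    (fun st c =>
      let cur := pvRomanVal c
      (if cur < st.2 then st.1 - cur else st.1 + cur, cur)) ((0 : Int), (0 : Int))).1

-- the while-loop insertion: before the first element ≥ value
def pvIns (v : Int) : List Int → List Int
  | [] => [v]
  | x :: xs => if x < v then x :: pvIns v xs else v :: x :: xs

def pvValueB (s : String) : Int :=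
  if pvIsRoman s then pvRomanB s.toList else (PySem.Int.ofStr? s).getD 0

def sort_numerals_1_alt (nums : List String) : List Int :=
  nums.foldl (fun result num_str => pvIns (pvValueB num_str) result) []

-- ===== PRECONDITION & SPEC =====
-- Pre_ excludes exactly the inputs where A raises: a non-Roman string on which int() raises
-- ValueError (B raises there too).
def Pre_sort_numerals_1 (nums : List String) : Prop :=
  (nums.all (fun s => pvIsRoman s || (PySem.Int.ofStr? s).isSome)) = true
instance (nums : List String) : Decidable (Pre_sort_numerals_1 nums) := by
  unfold Pre_sort_numerals_1; infer_instance

def pvWitness_sort_numerals_1 : List String := (["XIV", "-12", "IIX", ""])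

def Spec_sort_numerals_1 (nums : List String) (out : List Int) : Prop := out = sort_numerals_1_alt nums
instance (nums : List String) (out : List Int) : Decidable (Spec_sort_numerals_1 nums out) := by unfold Spec_sort_numerals_1; infer_instance

-- ===== CLAIM (what is proved, stated in full; the proofs are below) =====
def Claim_equal_sort_numerals_1 : Prop := ∀ (nums : List String), Dom_sort_numerals_1 nums → Pre_sort_numerals_1 nums → Spec_sort_numerals_1 nums (sort_numerals_1 nums)

-- ===== LEMMAS AND PROOFS =====

-- A's per-character loop, characterised recursively.
def pvRomanRec : List Int → Int
  | [] => 0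
  | [v] => v
  | v :: w :: rest => (if v < w then -v else v) + pvRomanRec (w :: rest)

-- B's scan, characterised with the initial `prev` explicit.
def pvRomanRec' : List Int → Int → Int
  | [], _ => 0
  | [v], p0 => if v < p0 then -v else v
  | v :: w :: rest, p0 => (if v < w then -v else v) + pvRomanRec' (w :: rest) p0

theorem pvRomanA_eq_rec (vs : List Int) (a : Int) :
    (List.range vs.length).foldl
      (fun total i =>
        if i < vs.length - 1 ∧ vs.getD i 0 < vs.getD (i+1) 0
        then total - vs.getD i 0
        else total + vs.getD i 0) a = a + pvRomanRec vs := by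
  induction vs generalizing a with
  | nil => simp [pvRomanRec]
  | cons v rest ih =>
    rw [show (v :: rest).length = rest.length + 1 from rfl, List.range_succ_eq_map,
      List.foldl_cons, List.foldl_map]
    simp only [Nat.succ_eq_add_one]
    have hcong :
        (fun (total : Int) (i : Nat) =>
          if i + 1 < rest.length + 1 - 1 ∧
              (v :: rest).getD (i+1) 0 < (v :: rest).getD (i+1+1) 0
          then total - (v :: rest).getD (i+1) 0
          else total + (v :: rest).getD (i+1) 0)
        = (fun (total : Int) (i : Nat) =>
          if i < rest.length - 1 ∧ rest.getD i 0 < rest.getD (i+1) 0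
          then total - rest.getD i 0
          else total + rest.getD i 0) := by
      funext total i
      have h3 : (i + 1 < rest.length + 1 - 1) = (i < rest.length - 1) := by
        simp only [eq_iff_iff]; omega
      simp only [List.getD_cons_succ, h3]
    rw [hcong, ih]
    cases rest with
    | nil => simp [pvRomanRec]
    | cons w rest' =>
      have hd0 : (v :: w :: rest').getD 0 0 = v := rfl
      have hd1 : (v :: w :: rest').getD 1 0 = w := rfl
      simp only [hd0, hd1, pvRomanRec, List.length_cons]
      by_cases h : v < w <;> (simp [h]; try ring)

-- the reversed fold, on the list of values
theorem pvRomanB_fold_rec (vs : List Int) (t0 p0 : Int) :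
    vs.reverse.foldl
      (fun (st : Int × Int) v => (if v < st.2 then st.1 - v else st.1 + v, v)) (t0, p0)
    = (t0 + pvRomanRec' vs p0, vs.headD p0) := by
  induction vs generalizing t0 p0 with
  | nil => simp [pvRomanRec']
  | cons v rest ih =>
    rw [List.reverse_cons, List.foldl_append, ih]
    cases rest with
    | nil => simp only [List.foldl_cons, List.foldl_nil, pvRomanRec', List.headD_nil, List.headD_cons]; by_cases h : v < p0 <;> simp [h] <;> try ring
    | cons w rest' =>
      simp only [List.headD_cons, List.foldl_cons, List.foldl_nil, pvRomanRec']
      by_cases h : v < w <;> simp [h] <;> ring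

theorem pvRomanRec'_zero (vs : List Int) (h : ∀ v ∈ vs, 0 ≤ v) :
    pvRomanRec' vs 0 = pvRomanRec vs := by
  induction vs with
  | nil => rfl
  | cons v rest ih =>
    cases rest with
    | nil =>
      have hv : 0 ≤ v := h v (by simp)
      simp [pvRomanRec', pvRomanRec, show ¬ v < 0 from by omega]
    | cons w rest' =>
      simp only [pvRomanRec', pvRomanRec]
      rw [ih (fun x hx => h x (List.mem_cons_of_mem v hx))]

theorem pvRomanVal_nonneg (c : Char) : 0 ≤ pvRomanVal c := by
  unfold pvRomanVal; split_ifs <;> norm_num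

theorem pvRoman_eq (cs : List Char) : pvRomanA cs = pvRomanB cs := by
  unfold pvRomanA pvRomanB
  have hlen : (cs.map pvRomanVal).length = cs.length := by simp
  have hget : ∀ i : Nat, (cs.map pvRomanVal).getD i 0 = pvRomanVal (cs.getD i ' ') := by
    intro i
    by_cases h : i < cs.length
    · rw [List.getD_eq_getElem _ _ (by simpa using h), List.getD_eq_getElem _ _ h]
      simp
    · rw [List.getD_eq_default _ _ (by omega), List.getD_eq_default _ _ (by omega), pvRomanVal]
      simp
  have hA := pvRomanA_eq_rec (cs.map pvRomanVal) 0
  simp only [hlen, hget, zero_add] at hA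
  rw [hA]
  have hB : cs.reverse.foldl
      (fun (st : Int × Int) c =>
        let cur := pvRomanVal c
        (if cur < st.2 then st.1 - cur else st.1 + cur, cur)) ((0 : Int), (0 : Int))
      = ((cs.map pvRomanVal).reverse).foldl
        (fun (st : Int × Int) v => (if v < st.2 then st.1 - v else st.1 + v, v)) (0, 0) := by
    rw [← List.map_reverse, List.foldl_map]
  rw [hB, pvRomanB_fold_rec, pvRomanRec'_zero _ (by
    intro v hv
    rcases List.mem_map.mp hv with ⟨c, _, rfl⟩
    exact pvRomanVal_nonneg c)]
  simp

-- membership / permutation / order facts about the insertion helper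
theorem pvIns_perm (v : Int) (l : List Int) : (pvIns v l).Perm (v :: l) := by
  induction l with
  | nil => simp [pvIns]
  | cons x xs ih =>
    unfold pvIns
    by_cases h : x < v
    · simpa [h] using ((ih.cons x).trans (List.Perm.swap v x xs))
    · simp [h]

theorem pvIns_pairwise (v : Int) (l : List Int)
    (h : l.Pairwise (· ≤ ·)) : (pvIns v l).Pairwise (· ≤ ·) := by
  induction l with
  | nil => simp [pvIns]
  | cons x xs ih =>
    rw [List.pairwise_cons] at h
    unfold pvIns
    by_cases hx : x < v
    · simp only [hx, if_true]
      rw [List.pairwise_cons]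
      refine ⟨?_, ih h.2⟩
      intro y hy
      rcases List.mem_cons.mp ((pvIns_perm v xs).mem_iff.mp hy) with rfl | hy'
      · omega
      · exact h.1 y hy'
    · simp only [hx, if_false]
      rw [List.pairwise_cons]
      refine ⟨?_, List.pairwise_cons.mpr h⟩
      intro y hy
      rcases List.mem_cons.mp hy with rfl | hy'
      · omega
      · have := h.1 y hy'; omega

-- the insertion fold: a sorted permutation of acc ++ vals
theorem foldl_pvIns_perm (vals : List Int) (acc : List Int) :
    (vals.foldl (fun res v => pvIns v res) acc).Perm (acc ++ vals) := by
  induction vals generalizing acc with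
  | nil => simp
  | cons v vs ih =>
    rw [List.foldl_cons]
    refine (ih (pvIns v acc)).trans ?_
    have h1 : (pvIns v acc ++ vs).Perm ((v :: acc) ++ vs) :=
      (pvIns_perm v acc).append_right vs
    refine h1.trans ?_
    simpa using List.perm_middle.symm

theorem foldl_pvIns_pairwise (vals : List Int) (acc : List Int)
    (h : acc.Pairwise (· ≤ ·)) :
    (vals.foldl (fun res v => pvIns v res) acc).Pairwise (· ≤ ·) := by
  induction vals generalizing acc with
  | nil => simpa
  | cons v vs ih => exact ih _ (pvIns_pairwise v acc h)

theorem foldl_append_map (nums : List String) (f : String → Int) (acc : List Int) :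
    nums.foldl (fun acc s => acc ++ [f s]) acc = acc ++ nums.map f := by
  induction nums generalizing acc with
  | nil => simp
  | cons x xs ih => simp [ih]

-- ===== VERDICT (by name: the statement is the Claim_ definition above) =====
theorem sort_numerals_1_spec : Claim_equal_sort_numerals_1 := by
  intro nums _ _
  unfold Spec_sort_numerals_1 sort_numerals_1 sort_numerals_1_alt
  have hfa : (fun num_str => if pvIsRoman num_str then pvRomanA num_str.toList
      else (PySem.Int.ofStr? num_str).getD 0) = pvValueB := by
    funext s
    by_cases h : pvIsRoman s <;> simp [pvValueB, h, pvRoman_eq]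
  rw [foldl_append_map, List.nil_append, hfa]
  have hfold : nums.foldl (fun result num_str => pvIns (pvValueB num_str) result) []
      = (nums.map pvValueB).foldl (fun res v => pvIns v res) [] := by
    rw [List.foldl_map]
  rw [hfold]
  have hperm := foldl_pvIns_perm (nums.map pvValueB) []
  simp only [List.nil_append] at hperm
  have hpw := foldl_pvIns_pairwise (nums.map pvValueB) [] (by simp)
  show PySem.List.sorted (List.map pvValueB nums) (fun x => x) false = _
  exact PySem.List.sorted_id_eq_of_perm_of_pairwise _ _ hperm hpw
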